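-- pv_equiv track=rewrite | github.com/pypi-data/pypi-mirror-368 | packages/cxglearner/cxglearner-1.3.3b0-cp310-cp310-manylinux_2_17_x86_64.manylinux2014_x86_64.whl/cxglearner/utils/utils_learner.py | calculate_chunk_indices
-- ===== SOURCE A (Python) =====
-- def calculate_chunk_indices(total_data_count, group_count):
--     if group_count < 1:
--         raise ValueError("Group count must be at least 1.")
--     if total_data_count < group_count:
--         raise ValueError("Group count is more than total data count.")
--     base_size = total_data_count // group_count
--     remainder = total_data_count % group_count
--     indices = []
--     current_index = 0
--     for i in range(group_count):
--         indices.append(current_index)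
--         current_index += base_size + (1 if i < remainder else 0)
--     return indices
-- ===== SOURCE B (Python) =====
-- def calculate_chunk_indices(total_data_count, group_count):
--     if group_count < 1:
--         raise ValueError("Group count must be at least 1.")
--     if total_data_count < group_count:
--         raise ValueError("Group count is more than total data count.")
--     base, remainder = divmod(total_data_count, group_count)
--     big_end = remainder * (base + 1)
--     # first `remainder` chunks have size base+1, the rest size base
--     return list(range(0, big_end, base + 1)) + list(range(big_end, total_data_count, base))
-- ===== Notes on version B (the rewrite author's own statement) =====
-- stated objective: alternative
-- what changed: Replaced A's per-chunk loop with a running current_index accumulator by two arithmetic range() constructions: the first `remainder` start indices stepped by base+1 and the remaining ones stepped by base, concatenated.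
import Mathlib
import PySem

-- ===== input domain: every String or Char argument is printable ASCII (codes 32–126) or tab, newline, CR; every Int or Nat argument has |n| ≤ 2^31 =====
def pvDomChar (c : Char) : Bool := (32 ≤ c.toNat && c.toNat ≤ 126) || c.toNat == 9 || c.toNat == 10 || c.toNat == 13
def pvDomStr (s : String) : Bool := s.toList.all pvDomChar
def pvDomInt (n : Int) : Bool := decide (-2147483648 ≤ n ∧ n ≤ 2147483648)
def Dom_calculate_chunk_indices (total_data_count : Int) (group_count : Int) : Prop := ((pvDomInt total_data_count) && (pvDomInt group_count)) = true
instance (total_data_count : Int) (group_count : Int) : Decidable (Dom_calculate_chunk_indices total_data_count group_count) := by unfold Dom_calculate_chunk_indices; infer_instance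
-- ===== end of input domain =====

-- B builds the result as two arithmetic ranges (step base+1 for the first remainder chunks, step base for the rest) instead of A's per-chunk accumulator loop; equivalence of return values on inputs where A does not raise.

-- ===== PORT A =====
-- Literal port of A: the two guards (where Python raises ValueError, excluded by Pre_) and a
-- fold over range(group_count) carrying (indices, current_index).
def calculate_chunk_indices (total_data_count : Int) (group_count : Int) : List Int :=
  if group_count < 1 then []          -- Python raises ValueError here (outside Pre_)
  else if total_data_count < group_count then []   -- Python raises ValueError here (outside Pre_)
  else
    -- base_size = total_data_count // group_count, remainder = total_data_count % group_count (inlined)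
    (((PySem.List.pyRange 0 group_count 1).foldl
        (fun (st : List Int × Int) i =>
          (st.1 ++ [st.2], st.2 + PySem.Int.floordiv total_data_count group_count
            + (if i < PySem.Int.mod total_data_count group_count then 1 else 0)))
        ([], 0))).1

-- ===== PORT B =====
-- Literal port of B: same guards, then the concatenation of the two range() constructions.
def calculate_chunk_indices_alt (total_data_count : Int) (group_count : Int) : List Int :=
  if group_count < 1 then []
  else if total_data_count < group_count then []
  else
    -- base, remainder = divmod(total_data_count, group_count); big_end = remainder * (base + 1)
    PySem.List.pyRange 0
        (PySem.Int.mod total_data_count group_count * (PySem.Int.floordiv total_data_count group_count + 1))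
        (PySem.Int.floordiv total_data_count group_count + 1)
      ++ PySem.List.pyRange
        (PySem.Int.mod total_data_count group_count * (PySem.Int.floordiv total_data_count group_count + 1))
        total_data_count
        (PySem.Int.floordiv total_data_count group_count)

-- ===== PRECONDITION & SPEC =====
-- Pre_ excludes exactly the inputs on which A raises ValueError: group_count < 1 or total_data_count < group_count.
def Pre_calculate_chunk_indices (total_data_count : Int) (group_count : Int) : Prop :=
  1 ≤ group_count ∧ group_count ≤ total_data_count
instance (total_data_count : Int) (group_count : Int) : Decidable (Pre_calculate_chunk_indices total_data_count group_count) := by unfold Pre_calculate_chunk_indices; infer_instance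
def pvWitness_calculate_chunk_indices : Int × Int := (10, 3)

def Spec_calculate_chunk_indices (total_data_count : Int) (group_count : Int) (out : List Int) : Prop := out = calculate_chunk_indices_alt total_data_count group_count
instance (total_data_count : Int) (group_count : Int) (out : List Int) : Decidable (Spec_calculate_chunk_indices total_data_count group_count out) := by unfold Spec_calculate_chunk_indices; infer_instance

-- ===== CLAIM (what is proved, stated in full; the proofs are below) =====
def Claim_equal_calculate_chunk_indices : Prop := ∀ (total_data_count : Int) (group_count : Int), Dom_calculate_chunk_indices total_data_count group_count → Pre_calculate_chunk_indices total_data_count group_count → Spec_calculate_chunk_indices total_data_count group_count (calculate_chunk_indices total_data_count group_count)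

-- ===== LEMMAS AND PROOFS =====

-- Loop invariant for A's fold: after processing 0..n-1 the accumulated list is the per-index
-- closed-form prefix and current_index equals n*base + min n rem (for 0 ≤ rem).
theorem chunk_loop (base rem : Int) (hrem : 0 ≤ rem) (n : Nat) :
    ((PySem.List.pyRange 0 (n : Int) 1).foldl
        (fun (st : List Int × Int) i =>
          (st.1 ++ [st.2], st.2 + base + (if i < rem then 1 else 0)))
        ([], 0))
    = ((PySem.List.pyRange 0 (n : Int) 1).map (fun k => k * base + min k rem),
       (n : Int) * base + min (n : Int) rem) := by
  induction n with
  | zero =>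
    rw [PySem.List.pyRange_one_eq_nil (by norm_num)]
    simp [min_eq_left hrem]
  | succ n ih =>
    have hcast : ((n + 1 : Nat) : Int) = (n : Int) + 1 := by push_cast; ring
    rw [hcast, PySem.List.pyRange_one_succ_right (by positivity),
        List.foldl_append, List.map_append, ih]
    simp only [List.foldl_cons, List.foldl_nil, List.map_cons, List.map_nil]
    rw [Prod.mk.injEq]
    refine ⟨rfl, ?_⟩
    by_cases h : (n : Int) < rem
    · have h1 : min (n : Int) rem = n := by omega
      have h2 : min ((n : Int) + 1) rem = (n : Int) + 1 := by omega
      rw [if_pos h, h1, h2]; ring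
    · have h1 : min (n : Int) rem = rem := by omega
      have h2 : min ((n : Int) + 1) rem = rem := by omega
      rw [if_neg h, h1, h2]; ring

-- A positive-step range whose length divides out exactly: range(a, a + s*n, s) lists a + s*k.
theorem pyRange_step_exact (a s : Int) (hs : 0 < s) (n : Nat) :
    PySem.List.pyRange a (a + s * n) s = (List.range n).map (fun k : Nat => a + s * (k : Int)) := by
  rw [PySem.List.pyRange_of_pos _ _ hs]
  rcases Nat.eq_zero_or_pos n with h0 | hpos
  · subst h0; simp
  · have hlt : a < a + s * n := by
      have : (0 : Int) < s * n := by positivity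
      omega
    rw [if_pos hlt]
    have : (a + s * ↑n - a + s - 1) / s = n := by
      have h1 : a + s * ↑n - a + s - 1 = (s - 1) + s * n := by ring
      rw [h1, Int.add_mul_ediv_left _ _ (by omega : s ≠ 0),
          Int.ediv_eq_zero_of_lt (by omega) (by omega)]
      simp
    rw [this, Int.toNat_natCast]

-- The per-index closed form splits into the two ranges of B.
theorem closed_form_eq_ranges (base rem g : Int) (hbase : 1 ≤ base) (hrem : 0 ≤ rem)
    (hrg : rem ≤ g) :
    (PySem.List.pyRange 0 g 1).map (fun k => k * base + min k rem)
      = PySem.List.pyRange 0 (rem * (base + 1)) (base + 1)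
        ++ PySem.List.pyRange (rem * (base + 1)) (rem * (base + 1) + base * (g - rem)) base := by
  rw [PySem.List.pyRange_one_append 0 rem g hrem hrg, List.map_append]
  congr 1
  · -- first part: k ∈ [0, rem), min k rem = k, value k*(base+1)
    have h1 : rem * (base + 1) = 0 + (base + 1) * rem.toNat := by
      rw [Int.toNat_of_nonneg hrem]; ring
    rw [h1, pyRange_step_exact 0 (base + 1) (by omega) rem.toNat,
        PySem.List.pyRange_one 0 rem]
    rw [show rem - 0 = rem by ring, List.map_map]
    apply List.map_congr_left
    intro k hk
    have hk' : (k : Int) < rem := by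
      have := List.mem_range.mp hk
      omega
    simp only [Function.comp_apply]
    rw [show min ((0 : Int) + k) rem = (0 : Int) + k by omega]; ring
  · -- second part: k ∈ [rem, g), min k rem = rem, value k*base + rem
    have h2 : rem * (base + 1) + base * (g - rem) = rem * (base + 1) + base * (g - rem).toNat := by
      rw [Int.toNat_of_nonneg (by omega)]
    rw [h2, pyRange_step_exact _ base (by omega) (g - rem).toNat,
        PySem.List.pyRange_one rem g, List.map_map]
    apply List.map_congr_left
    intro k hk
    have hk' : (0 : Int) ≤ k := by
      have := List.mem_range.mp hk
      omega
    simp only [Function.comp_apply]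
    rw [show min (rem + (k : Int)) rem = rem by omega]; ring

-- ===== VERDICT (by name: the statement is the Claim_ definition above) =====
theorem calculate_chunk_indices_spec : Claim_equal_calculate_chunk_indices := by
  intro t g _ hpre
  obtain ⟨h1, h2⟩ := hpre
  unfold Spec_calculate_chunk_indices calculate_chunk_indices calculate_chunk_indices_alt
  have hg1 : ¬ g < 1 := by omega
  have hg2 : ¬ t < g := by omega
  rw [if_neg hg1, if_neg hg2, if_neg hg1, if_neg hg2]
  set base := PySem.Int.floordiv t g with hbase_def
  set rem := PySem.Int.mod t g with hrem_def
  have hrem : 0 ≤ rem := PySem.Int.mod_nonneg t (by omega)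
  have hremlt : rem < g := by
    rw [hrem_def, PySem.Int.mod_eq_emod_of_pos (by omega : (0:Int) < g)]
    exact Int.emod_lt_of_pos t (by omega)
  have hdiv : base * g + rem = t := PySem.Int.floordiv_mul_add_mod t g
  have hbase1 : 1 ≤ base := by nlinarith
  have hgc : g = ((g.toNat : Nat) : Int) := by omega
  have ht : t = rem * (base + 1) + base * (g - rem) := by linarith
  rw [hgc, chunk_loop base rem hrem g.toNat, ← hgc, ht]
  exact closed_form_eq_ranges base rem g hbase1 hrem (by omega)
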